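-- pv_equiv track=rewrite | github.com/alex-s-hong/code_prep | akuna_practice/factorOf3and5.py | isIdealNum
-- ===== SOURCE A (Python) =====
-- def isIdealNum(num):
--     #even number
--     if not num & 1:
--         return False
--     if num < 2:
--         return False
--
--     while num > 1:
--         if num % 3 == 0:
--             num = num // 3
--
--         elif num % 5 ==0:
--             num = num // 5
--
--         else:
--             return False
--
--     return True
-- ===== SOURCE B (Python) =====
-- def isIdealNum(num):
--     # Multiplicative search: enumerate all products 3**i * 5**j up to num
--     # (no divisions); num qualifies iff it appears and exceeds 1.
--     p3 = 1
--     while p3 <= num: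
--         p5 = p3
--         while p5 <= num:
--             if p5 == num:
--                 return num > 1
--             p5 *= 5
--         p3 *= 3
--     return False
-- ===== Notes on version B (the rewrite author's own statement) =====
-- stated objective: alternative
-- what changed: Replaces A's trial-division loop (repeatedly dividing out factors of three and five) by a division-free multiplicative search that enumerates every product of powers of three and five up to num with two nested multiply loops and tests whether num itself appears (and exceeds one).
import Mathlib
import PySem

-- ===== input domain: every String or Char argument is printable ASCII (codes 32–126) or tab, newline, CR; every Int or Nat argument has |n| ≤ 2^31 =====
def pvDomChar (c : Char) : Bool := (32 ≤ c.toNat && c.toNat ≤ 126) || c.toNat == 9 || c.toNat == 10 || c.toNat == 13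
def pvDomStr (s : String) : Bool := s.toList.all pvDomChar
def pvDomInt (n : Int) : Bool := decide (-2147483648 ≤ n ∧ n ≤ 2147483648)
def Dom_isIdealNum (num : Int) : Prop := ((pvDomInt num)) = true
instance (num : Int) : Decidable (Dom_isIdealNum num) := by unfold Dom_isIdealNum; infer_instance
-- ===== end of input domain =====

-- B replaces A's trial-division loop by a division-free nested multiplicative
-- search over all products 3^i * 5^j up to num (objective: alternative).

-- ===== PORT A =====
-- A's while-loop: while num > 1: divide by 3 if possible, else by 5, else return False; True on exit.
def isIdealNumLoop (num : Int) : Bool :=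
  if _h : 1 < num then
    if PySem.Int.mod num 3 = 0 then
      isIdealNumLoop (PySem.Int.floordiv num 3)
    else if PySem.Int.mod num 5 = 0 then
      isIdealNumLoop (PySem.Int.floordiv num 5)
    else false
  else true
termination_by num.toNat
decreasing_by
  · rw [PySem.Int.floordiv_eq_ediv_of_pos (by omega)]; omega
  · rw [PySem.Int.floordiv_eq_ediv_of_pos (by omega)]; omega

def isIdealNum (num : Int) : Bool :=
  if PySem.Int.band num 1 = 0 then false
  else if num < 2 then false
  else isIdealNumLoop num

-- ===== PORT B =====
-- inner loop: while p5 <= num: if p5 == num: return num > 1; p5 *= 5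
-- (returns 'some (num > 1)' when the Python inner loop returns from the
-- function, 'none' when it falls through; the '0 < p5' conjunct only makes
-- the recursion total — p5 is always a positive product of powers here)
def searchB5 (num p5 : Int) : Option Bool :=
  if _h : 0 < p5 ∧ p5 ≤ num then
    if hne : p5 = num then some (decide (1 < num))
    else searchB5 num (p5 * 5)
  else none
termination_by (num - p5).toNat
decreasing_by omega

-- outer loop: while p3 <= num: <inner loop>; p3 *= 3
def searchB3 (num p3 : Int) : Bool :=
  if _h : 0 < p3 ∧ p3 ≤ num then
    match searchB5 num p3 with
    | some b => b
    | none => searchB3 num (p3 * 3)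
  else false
termination_by (num + 1 - p3).toNat
decreasing_by omega

def isIdealNum_alt (num : Int) : Bool := searchB3 num 1

-- ===== PRECONDITION & SPEC =====
def Spec_isIdealNum (num : Int) (out : Bool) : Prop := out = isIdealNum_alt num
instance (num : Int) (out : Bool) : Decidable (Spec_isIdealNum num out) := by unfold Spec_isIdealNum; infer_instance

-- ===== CLAIM (what is proved, stated in full; the proofs are below) =====
def Claim_equal_isIdealNum : Prop := ∀ (num : Int), Dom_isIdealNum num → Spec_isIdealNum num (isIdealNum num)

-- ===== LEMMAS AND PROOFS =====

-- "num is a product of only 3s and 5s"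
def Smooth35 (n : Int) : Prop := ∃ a b : ℕ, n = 3 ^ a * 5 ^ b

theorem smooth_odd {n : Int} (h : Smooth35 n) : n % 2 = 1 := by
  obtain ⟨a, b, rfl⟩ := h
  have : Odd ((3:ℤ) ^ a * 5 ^ b) :=
    (Odd.pow (by decide)).mul (Odd.pow (by decide))
  exact Int.odd_iff.mp this

theorem prime_three : Prime (3 : Int) := Int.prime_three

theorem smooth_div3 {n : Int} (h3 : (3:Int) ∣ n) :
    Smooth35 n ↔ Smooth35 (n / 3) := by
  constructor
  · rintro ⟨a, b, rfl⟩
    cases a with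
    | zero =>
      exfalso
      simp only [pow_zero, one_mul] at h3
      have := prime_three.dvd_of_dvd_pow h3
      omega
    | succ a =>
      refine ⟨a, b, ?_⟩
      rw [pow_succ, mul_comm ((3:ℤ)^a) 3, mul_assoc,
        Int.mul_ediv_cancel_left _ (by norm_num)]
  · rintro ⟨a, b, hq⟩
    refine ⟨a + 1, b, ?_⟩
    obtain ⟨k, rfl⟩ := h3
    rw [Int.mul_ediv_cancel_left _ (by norm_num)] at hq
    subst hq; rw [pow_succ]; ring

theorem smooth_div5 {n : Int} (h3 : ¬ (3:Int) ∣ n) (h5 : (5:Int) ∣ n) :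
    Smooth35 n ↔ Smooth35 (n / 5) := by
  constructor
  · rintro ⟨a, b, rfl⟩
    cases a with
    | zero =>
      cases b with
      | zero => simp at h5
      | succ b =>
        refine ⟨0, b, ?_⟩
        simp only [pow_zero, one_mul] at *
        rw [pow_succ, mul_comm ((5:ℤ)^b) 5,
          Int.mul_ediv_cancel_left _ (by norm_num)]
    | succ a => exact absurd ⟨3 ^ a * 5 ^ b, by rw [pow_succ]; ring⟩ h3
  · rintro ⟨a, b, hq⟩
    refine ⟨a, b + 1, ?_⟩
    obtain ⟨k, rfl⟩ := h5
    rw [Int.mul_ediv_cancel_left _ (by norm_num)] at hq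
    subst hq; rw [pow_succ]; ring

theorem smooth_not {n : Int} (h1 : 1 < n) (h3 : ¬ (3:Int) ∣ n)
    (h5 : ¬ (5:Int) ∣ n) : ¬ Smooth35 n := by
  rintro ⟨a, b, rfl⟩
  cases a with
  | zero =>
    cases b with
    | zero => simp at h1
    | succ b => exact h5 ⟨5 ^ b, by rw [pow_succ]; ring⟩
  | succ a => exact h3 ⟨3 ^ a * 5 ^ b, by rw [pow_succ]; ring⟩

-- A's loop decides Smooth35 on positive inputs.
theorem loopA_iff (fuel : Nat) : ∀ (num : Int), num.toNat ≤ fuel → 0 < num →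
    (isIdealNumLoop num = true ↔ Smooth35 num) := by
  induction fuel with
  | zero => intro num hn hpos; omega
  | succ fuel ih =>
    intro num hn hpos
    by_cases h1 : 1 < num
    · rw [isIdealNumLoop, dif_pos h1]
      have hdiv3 : PySem.Int.floordiv num 3 = num / 3 :=
        PySem.Int.floordiv_eq_ediv_of_pos (by norm_num)
      have hdiv5 : PySem.Int.floordiv num 5 = num / 5 :=
        PySem.Int.floordiv_eq_ediv_of_pos (by norm_num)
      by_cases h3 : PySem.Int.mod num 3 = 0
      · have hd3 : (3:Int) ∣ num := by
          rw [PySem.Int.mod_eq_emod_of_pos (by norm_num)] at h3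
          exact Int.dvd_of_emod_eq_zero h3
        rw [if_pos h3, hdiv3]
        refine (ih (num / 3) (by omega) (by omega)).trans
          (smooth_div3 hd3).symm
      · have hd3 : ¬ (3:Int) ∣ num := by
          rw [PySem.Int.mod_eq_emod_of_pos (by norm_num)] at h3
          intro hd; omega
        rw [if_neg h3]
        by_cases h5 : PySem.Int.mod num 5 = 0
        · have hd5 : (5:Int) ∣ num := by
            rw [PySem.Int.mod_eq_emod_of_pos (by norm_num)] at h5
            exact Int.dvd_of_emod_eq_zero h5
          rw [if_pos h5, hdiv5]
          refine (ih (num / 5) (by omega) (by omega)).trans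
            (smooth_div5 hd3 hd5).symm
        · have hd5 : ¬ (5:Int) ∣ num := by
            rw [PySem.Int.mod_eq_emod_of_pos (by norm_num)] at h5
            intro hd; exact h5 (Int.emod_eq_zero_of_dvd hd)
          rw [if_neg h5]
          simpa using (smooth_not h1 hd3 hd5)
    · have : num = 1 := by omega
      subst this
      rw [isIdealNumLoop, dif_neg (by norm_num)]
      simp only [true_iff]
      exact ⟨0, 0, by norm_num⟩

-- inner-loop completeness: the search starting at p5 finds num = p5 * 5^k
theorem searchB5_complete (k : Nat) : ∀ (num p5 : Int), 0 < p5 →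
    num = p5 * 5 ^ k → searchB5 num p5 = some (decide (1 < num)) := by
  induction k with
  | zero =>
    intro num p5 hp heq
    simp only [pow_zero, mul_one] at heq
    rw [searchB5, dif_pos ⟨hp, by omega⟩, dif_pos heq.symm]
  | succ k ih =>
    intro num p5 hp heq
    have hle : p5 ≤ num := by
      have h1 : (1:ℤ) ≤ 5 ^ (k+1) := one_le_pow₀ (by norm_num)
      calc p5 = p5 * 1 := (mul_one p5).symm
        _ ≤ p5 * 5 ^ (k+1) := by exact mul_le_mul_of_nonneg_left h1 (by omega)
        _ = num := heq.symm
    rw [searchB5, dif_pos ⟨hp, hle⟩]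
    by_cases he : p5 = num
    · rw [dif_pos he]
    · rw [dif_neg he]
      exact ih num (p5 * 5) (by positivity) (by rw [heq, pow_succ]; ring)

-- inner-loop soundness
theorem searchB5_sound (fuel : Nat) : ∀ (num p5 : Int) (b : Bool),
    (num - p5).toNat ≤ fuel → searchB5 num p5 = some b →
    (∃ k : ℕ, num = p5 * 5 ^ k) ∧ b = decide (1 < num) := by
  induction fuel with
  | zero =>
    intro num p5 b hn hs
    rw [searchB5] at hs
    by_cases h : 0 < p5 ∧ p5 ≤ num
    · rw [dif_pos h] at hs
      have : p5 = num := by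
        by_contra hne
        rw [dif_neg hne] at hs
        -- recursion with p5*5 > num: guard fails, returns none
        rw [searchB5, dif_neg (by omega)] at hs
        simp at hs
      rw [dif_pos this] at hs
      exact ⟨⟨0, by simp [this]⟩, (Option.some.inj hs).symm⟩
    · rw [dif_neg h] at hs; simp at hs
  | succ fuel ih =>
    intro num p5 b hn hs
    rw [searchB5] at hs
    by_cases h : 0 < p5 ∧ p5 ≤ num
    · rw [dif_pos h] at hs
      by_cases he : p5 = num
      · rw [dif_pos he] at hs
        exact ⟨⟨0, by simp [he]⟩, (Option.some.inj hs).symm⟩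
      · rw [dif_neg he] at hs
        obtain ⟨⟨k, hk⟩, hb⟩ := ih num (p5 * 5) b (by omega) hs
        exact ⟨⟨k + 1, by rw [hk, pow_succ]; ring⟩, hb⟩
    · rw [dif_neg h] at hs; simp at hs

-- outer-loop soundness
theorem searchB3_sound (fuel : Nat) : ∀ (num p3 : Int),
    (num - p3).toNat ≤ fuel → searchB3 num p3 = true →
    (∃ i k : ℕ, num = p3 * 3 ^ i * 5 ^ k) ∧ 1 < num := by
  induction fuel with
  | zero =>
    intro num p3 hn hs
    rw [searchB3.eq_def] at hs
    by_cases h : 0 < p3 ∧ p3 ≤ num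
    · rw [dif_pos h] at hs
      cases hI : searchB5 num p3 with
      | some b =>
        rw [hI] at hs
        obtain ⟨⟨k, hk⟩, hb⟩ := searchB5_sound (num - p3).toNat num p3 b le_rfl hI
        refine ⟨⟨0, k, by rw [hk]; ring⟩, ?_⟩
        subst hs; simpa using hb.symm
      | none =>
        rw [hI] at hs
        rw [searchB3.eq_def, dif_neg (by omega)] at hs
        simp at hs
    · rw [dif_neg h] at hs; simp at hs
  | succ fuel ih =>
    intro num p3 hn hs
    rw [searchB3.eq_def] at hs
    by_cases h : 0 < p3 ∧ p3 ≤ num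
    · rw [dif_pos h] at hs
      cases hI : searchB5 num p3 with
      | some b =>
        rw [hI] at hs
        obtain ⟨⟨k, hk⟩, hb⟩ := searchB5_sound (num - p3).toNat num p3 b le_rfl hI
        refine ⟨⟨0, k, by rw [hk]; ring⟩, ?_⟩
        subst hs; simpa using hb.symm
      | none =>
        rw [hI] at hs
        obtain ⟨⟨i, k, hk⟩, h1⟩ := ih num (p3 * 3) (by omega) hs
        exact ⟨⟨i + 1, k, by rw [hk, pow_succ]; ring⟩, h1⟩
    · rw [dif_neg h] at hs; simp at hs

-- outer-loop completeness
theorem searchB3_complete (i : Nat) : ∀ (num p3 : Int), 0 < p3 →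
    (∃ k : ℕ, num = p3 * 3 ^ i * 5 ^ k) → 1 < num → searchB3 num p3 = true := by
  induction i with
  | zero =>
    intro num p3 hp ⟨k, hk⟩ h1
    simp only [pow_zero, mul_one] at hk
    have hle : p3 ≤ num := by
      have h5 : (1:ℤ) ≤ 5 ^ k := one_le_pow₀ (by norm_num)
      calc p3 = p3 * 1 := (mul_one p3).symm
        _ ≤ p3 * 5 ^ k := mul_le_mul_of_nonneg_left h5 (by omega)
        _ = num := hk.symm
    rw [searchB3.eq_def, dif_pos ⟨hp, hle⟩,
      searchB5_complete k num p3 hp hk]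
    simpa using h1
  | succ i ih =>
    intro num p3 hp ⟨k, hk⟩ h1
    have hle : p3 ≤ num := by
      have hpow : (1:ℤ) ≤ 3 ^ (i+1) * 5 ^ k :=
        one_le_mul_of_one_le_of_one_le (one_le_pow₀ (by norm_num)) (one_le_pow₀ (by norm_num))
      calc p3 = p3 * 1 := (mul_one p3).symm
        _ ≤ p3 * (3 ^ (i+1) * 5 ^ k) := mul_le_mul_of_nonneg_left hpow (by omega)
        _ = num := by rw [hk]; ring
    rw [searchB3.eq_def, dif_pos ⟨hp, hle⟩]
    cases hI : searchB5 num p3 with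
    | some b =>
      obtain ⟨_, hb⟩ := searchB5_sound (num - p3).toNat num p3 b le_rfl hI
      subst hb; simpa using h1
    | none =>
      exact ih num (p3 * 3) (by positivity)
        ⟨k, by rw [hk, pow_succ]; ring⟩ h1

theorem altB_iff (num : Int) :
    isIdealNum_alt num = true ↔ Smooth35 num ∧ 1 < num := by
  unfold isIdealNum_alt
  constructor
  · intro h
    obtain ⟨⟨i, k, hk⟩, h1⟩ := searchB3_sound (num - 1).toNat num 1 le_rfl h
    exact ⟨⟨i, k, by rw [hk]; ring⟩, h1⟩
  · rintro ⟨⟨a, b, hab⟩, h1⟩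
    exact searchB3_complete a num 1 (by norm_num) ⟨b, by rw [hab]; ring⟩ h1

theorem A_iff (num : Int) :
    isIdealNum num = true ↔ Smooth35 num ∧ 1 < num := by
  unfold isIdealNum
  rw [PySem.Int.band_one, PySem.Int.mod_eq_emod_of_pos (by norm_num)]
  by_cases h2 : num % 2 = 0
  · rw [if_pos h2]
    constructor
    · intro hs; exact absurd hs (by simp)
    · rintro ⟨hs, _⟩; exfalso; have := smooth_odd hs; omega
  · rw [if_neg h2]
    by_cases hlt : num < 2
    · rw [if_pos hlt]
      constructor
      · intro hs; exact absurd hs (by simp)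
      · rintro ⟨_, h1⟩; exfalso; omega
    · rw [if_neg hlt]
      rw [loopA_iff num.toNat num le_rfl (by omega)]
      exact ⟨fun hs => ⟨hs, by omega⟩, fun h => h.1⟩

-- ===== VERDICT (by name: the statement is the Claim_ definition above) =====
theorem isIdealNum_spec : Claim_equal_isIdealNum := by
  intro num _
  unfold Spec_isIdealNum
  have hA := A_iff num
  have hB := altB_iff num
  cases hA' : isIdealNum num with
  | true => exact ((hB.mpr (hA.mp hA')).symm)
  | false =>
    cases hB' : isIdealNum_alt num with
    | true => rw [← hA'] ; exact absurd (hA.mpr (hB.mp hB')) (by simp [hA'])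
    | false => rfl
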